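-- pv_equiv track=rewrite | github.com/mkeyno/easy_airfoil_selection | utill.py | find_reynolds_location
-- ===== SOURCE A (Python) =====
-- ReynoldSeries=[50000,100000,200000,500000,1000000]
--
-- def find_reynolds_location(rey):
--     j=0
--     for num in ReynoldSeries:
--         if rey >= num: j+=1
--
--     if   j==0:
--         s=f'{rey:,} < {ReynoldSeries[0]:,}'
--         v=ReynoldSeries[0]
--     elif j==5:
--         s=f'{ReynoldSeries[4]:,} < {rey:,}'
--         v=ReynoldSeries[4]
--     else     :
--         s=f'{ReynoldSeries[j-1]:,} < {rey:,} < {ReynoldSeries[j]:,}'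
--         v=ReynoldSeries[j]
--     #ss=f'{s:>60}'
--     return v, s
-- ===== SOURCE B (Python) =====
-- ReynoldSeries = [50000, 100000, 200000, 500000, 1000000]
--
-- def find_reynolds_location(rey):
--     # binary search: j = number of thresholds <= rey (bisect_right, hand-rolled)
--     lo, hi = 0, len(ReynoldSeries)
--     while lo < hi:
--         mid = (lo + hi) // 2
--         if rey >= ReynoldSeries[mid]:
--             lo = mid + 1
--         else:
--             hi = mid
--     j = lo
--     if j == 0:
--         v = ReynoldSeries[0]
--         s = f'{rey:,} < {v:,}'
--     elif j == len(ReynoldSeries):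
--         v = ReynoldSeries[-1]
--         s = f'{v:,} < {rey:,}'
--     else:
--         v = ReynoldSeries[j]
--         s = f'{ReynoldSeries[j-1]:,} < {rey:,} < {v:,}'
--     return v, s
-- ===== Notes on version B (the rewrite author's own statement) =====
-- stated objective: alternative
-- what changed: Replaces the linear count loop over the threshold list by a hand-rolled bisect_right binary search (lo/hi halving) to locate the interval, then the same three-way branch.
import Mathlib
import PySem

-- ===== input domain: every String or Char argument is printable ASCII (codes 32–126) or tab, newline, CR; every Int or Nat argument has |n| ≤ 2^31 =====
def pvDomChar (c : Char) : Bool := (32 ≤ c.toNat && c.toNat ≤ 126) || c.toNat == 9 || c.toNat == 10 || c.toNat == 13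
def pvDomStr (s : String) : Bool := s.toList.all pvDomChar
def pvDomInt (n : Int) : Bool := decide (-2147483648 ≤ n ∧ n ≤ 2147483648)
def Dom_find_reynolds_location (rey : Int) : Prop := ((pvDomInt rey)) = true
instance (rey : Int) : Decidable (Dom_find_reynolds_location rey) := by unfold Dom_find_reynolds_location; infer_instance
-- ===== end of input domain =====

-- B replaces A's linear count loop over the fixed threshold list with a hand-rolled
-- bisect_right binary search; same three-way branch and identical formatted string.


-- ===== PORT A =====
def reynoldSeries : List Int := [50000, 100000, 200000, 500000, 1000000]

-- f'{n:,}': insert a comma every three digits from the right (shared formatting helper,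
-- both Pythons use the same f-string ',' format spec)
def group3 : List Char → List Char
  | a :: b :: c :: d :: rest => a :: b :: c :: ',' :: group3 (d :: rest)
  | l => l

def commaFmt (n : Int) : String :=
  (if n < 0 then "-" else "") ++
    String.ofList (group3 ((PySem.Int.toStr (n.natAbs : Int)).toList.reverse)).reverse

def find_reynolds_location (rey : Int) : Int × String :=
  let j : Int := reynoldSeries.foldl (fun j num => if rey ≥ num then j + 1 else j) 0
  if j = 0 then
    (50000, commaFmt rey ++ " < " ++ commaFmt 50000)
  else if j = 5 then
    (1000000, commaFmt 1000000 ++ " < " ++ commaFmt rey)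
  else
    let lo := reynoldSeries.getD (j - 1).toNat 0   -- j ∈ [1,4] here, index always in range
    let hi := reynoldSeries.getD j.toNat 0
    (hi, commaFmt lo ++ " < " ++ commaFmt rey ++ " < " ++ commaFmt hi)

-- ===== PORT B =====
-- hand-rolled bisect_right from Source B; fuel only guarantees termination (hi-lo halves, 8 ≫ log2 5)
def bsearch (rey : Int) : Nat → Nat → Nat → Nat
  | 0, lo, _ => lo
  | fuel + 1, lo, hi =>
    if lo < hi then
      let mid := (lo + hi) / 2
      if rey ≥ reynoldSeries.getD mid 0 then bsearch rey fuel (mid + 1) hi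
      else bsearch rey fuel lo mid
    else lo

def find_reynolds_location_alt (rey : Int) : Int × String :=
  let j := bsearch rey 8 0 5
  if j = 0 then
    let v := reynoldSeries.getD 0 0
    (v, commaFmt rey ++ " < " ++ commaFmt v)
  else if j = 5 then
    let v := reynoldSeries.getD 4 0
    (v, commaFmt v ++ " < " ++ commaFmt rey)
  else
    let v := reynoldSeries.getD j 0
    (v, commaFmt (reynoldSeries.getD (j - 1) 0) ++ " < " ++ commaFmt rey ++ " < " ++ commaFmt v)

-- ===== PRECONDITION & SPEC =====
def Spec_find_reynolds_location (rey : Int) (out : Int × String) : Prop := out = find_reynolds_location_alt rey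
instance (rey : Int) (out : Int × String) : Decidable (Spec_find_reynolds_location rey out) := by unfold Spec_find_reynolds_location; infer_instance

-- ===== CLAIM (what is proved, stated in full; the proofs are below) =====
def Claim_equal_find_reynolds_location : Prop := ∀ (rey : Int), Dom_find_reynolds_location rey → Spec_find_reynolds_location rey (find_reynolds_location rey)

-- ===== LEMMAS AND PROOFS =====

-- ===== VERDICT (by name: the statement is the Claim_ definition above) =====
theorem find_reynolds_location_spec : Claim_equal_find_reynolds_location := by
  intro rey _
  unfold Spec_find_reynolds_location find_reynolds_location find_reynolds_location_alt
  by_cases h1 : (50000 : Int) ≤ rey <;>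
  by_cases h2 : (100000 : Int) ≤ rey <;>
  by_cases h3 : (200000 : Int) ≤ rey <;>
  by_cases h4 : (500000 : Int) ≤ rey <;>
  by_cases h5 : (1000000 : Int) ≤ rey <;>
  first
  | (exfalso; omega)
  | simp [reynoldSeries, bsearch, List.foldl, h1, h2, h3, h4, h5]
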